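-- pv_equiv track=rewrite | github.com/weishawn/ELC6242---Cryptography | tools.py | split_cipher_text
-- ===== SOURCE A (Python) =====
-- def split_cipher_text(cipher_text,key_length):
--     cipher_list = []
--     number_of_ciphers=key_length
--     for i in range(0,number_of_ciphers):
--         new_cipher = []
--         for j in range(0, len(cipher_text), key_length):
--             try:
--                 new_cipher.append(cipher_text[j+i])
--             except IndexError:
--                 continue
--         cipher_list.append(new_cipher)
--     return cipher_list
-- ===== SOURCE B (Python) =====
-- def split_cipher_text(cipher_text, key_length):
--     cipher_list = [[] for _ in range(key_length if key_length > 0 else 0)]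
--     if key_length > 0:
--         for idx, ch in enumerate(cipher_text):
--             cipher_list[idx % key_length].append(ch)
--     return cipher_list
-- ===== Notes on version B (the rewrite author's own statement) =====
-- stated objective: alternative
-- what changed: Replaces A's nested loops (one pass over a stepped index range per column, with try/except on out-of-range indices) by preallocating the key_length columns and routing each element to column idx % key_length in a single exception-free pass over the text.
import Mathlib
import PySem

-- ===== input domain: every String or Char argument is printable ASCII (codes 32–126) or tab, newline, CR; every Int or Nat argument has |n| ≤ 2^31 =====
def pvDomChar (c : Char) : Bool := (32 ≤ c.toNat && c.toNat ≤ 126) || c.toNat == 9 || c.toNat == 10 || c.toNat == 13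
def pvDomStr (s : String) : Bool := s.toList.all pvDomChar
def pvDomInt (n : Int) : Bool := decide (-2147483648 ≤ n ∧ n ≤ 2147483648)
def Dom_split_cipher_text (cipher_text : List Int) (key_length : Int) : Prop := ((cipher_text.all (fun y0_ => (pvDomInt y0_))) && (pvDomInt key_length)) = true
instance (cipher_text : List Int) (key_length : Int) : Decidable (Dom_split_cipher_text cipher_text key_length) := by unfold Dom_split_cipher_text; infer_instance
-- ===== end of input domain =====

-- B replaces A's per-column nested loops (with try/except on out-of-range indices) by one
-- pass routing each element to column idx % key_length; same cost class, exception-free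
-- single pass (objective: alternative).

-- ===== PORT A =====
-- for i in range(0, number_of_ciphers): … for j in range(0, len(cipher_text), key_length):
--   try: new_cipher.append(cipher_text[j+i]) except IndexError: continue
def split_cipher_text (cipher_text : List Int) (key_length : Int) : List (List Int) :=
  (PySem.List.pyRange 0 key_length 1).foldl
    (fun cipher_list i =>
      let new_cipher :=
        (PySem.List.pyRange 0 (cipher_text.length : Int) key_length).foldl
          (fun nc j =>
            match PySem.List.pyGet? cipher_text (j + i) with
            | some v => nc ++ [v]
            | none => nc) []
      cipher_list ++ [new_cipher]) []

-- ===== PORT B =====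
-- cipher_list = [[] for _ in range(key_length if key_length > 0 else 0)];
-- if key_length > 0: for idx, ch in enumerate(cipher_text): cipher_list[idx % key_length].append(ch)
def split_cipher_text_alt (cipher_text : List Int) (key_length : Int) : List (List Int) :=
  let init := List.replicate (if 0 < key_length then key_length.toNat else 0) ([] : List Int)
  if 0 < key_length then
    (PySem.List.enumerate cipher_text).foldl
      (fun cl p => cl.modify (PySem.Int.mod p.1 key_length).toNat (fun c => c ++ [p.2])) init
  else init

-- ===== PRECONDITION & SPEC =====
def Spec_split_cipher_text (cipher_text : List Int) (key_length : Int) (out : List (List Int)) : Prop := out = split_cipher_text_alt cipher_text key_length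
instance (cipher_text : List Int) (key_length : Int) (out : List (List Int)) : Decidable (Spec_split_cipher_text cipher_text key_length out) := by unfold Spec_split_cipher_text; infer_instance

-- ===== CLAIM (what is proved, stated in full; the proofs are below) =====
def Claim_equal_split_cipher_text : Prop := ∀ (cipher_text : List Int) (key_length : Int), Dom_split_cipher_text cipher_text key_length → Spec_split_cipher_text cipher_text key_length (split_cipher_text cipher_text key_length)

-- ===== LEMMAS AND PROOFS =====

-- column c (0-based) of the canonical split: the elements whose index is ≡ c (mod K)
def pvColumn (ct : List Int) (K c : Nat) : List Int :=
  (List.range ct.length).filterMap (fun x => if x % K = c then ct[x]? else none)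

-- a foldl that appends one mapped element per step is init ++ map
theorem pv_foldl_map_append {α β : Type} (l : List α) (f : α → β) (init : List β) :
    l.foldl (fun acc i => acc ++ [f i]) init = init ++ l.map f := by
  induction l generalizing init with
  | nil => simp
  | cons a l ih => simp [List.foldl_cons, ih, List.append_assoc]

-- a foldl that appends in-range reads and skips IndexError is init ++ filterMap
theorem pv_foldl_filterMap (l ct : List Int) (off : Int) (init : List Int) :
    l.foldl (fun nc j =>
        match PySem.List.pyGet? ct (j + off) with
        | some v => nc ++ [v]
        | none => nc) init
      = init ++ l.filterMap (fun j => PySem.List.pyGet? ct (j + off)) := by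
  induction l generalizing init with
  | nil => simp
  | cons a l ih =>
    cases h : PySem.List.pyGet? ct (a + off) <;>
      simp [List.foldl_cons, h, ih, List.append_assoc]

-- a filterMap over range may drop a tail of `none`s
theorem pv_fM_range_ext {β : Type} (f : Nat → Option β) (m M : Nat) (h : m ≤ M)
    (hn : ∀ t, m ≤ t → t < M → f t = none) :
    (List.range M).filterMap f = (List.range m).filterMap f := by
  obtain ⟨d, rfl⟩ : ∃ d, M = m + d := ⟨M - m, by omega⟩
  induction d with
  | zero => rfl
  | succ d ih =>
    rw [show m + (d + 1) = (m + d) + 1 from rfl, List.range_succ, List.filterMap_append]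
    rw [ih (by omega) (fun t h1 h2 => hn t h1 (by omega))]
    simp [hn (m + d) (by omega) (by omega)]

theorem pvColumn_append (xs : List Int) (x : Int) (K c : Nat) :
    pvColumn (xs ++ [x]) K c
      = pvColumn xs K c ++ (if xs.length % K = c then [x] else []) := by
  unfold pvColumn
  rw [show (xs ++ [x]).length = xs.length + 1 by simp, List.range_succ, List.filterMap_append]
  congr 1
  · apply List.filterMap_congr
    intro y hy
    have hy' : y < xs.length := List.mem_range.mp hy
    rw [List.getElem?_append_left hy']
  · by_cases h : xs.length % K = c
    · simp [h]
    · simp [h]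

-- reindexing: column c equals the stride-K reads starting at c
theorem pvColumn_stride (ct : List Int) (K c : Nat) (hc : c < K) :
    pvColumn ct K c = (List.range ct.length).filterMap (fun t => ct[K * t + c]?) := by
  have hK : 0 < K := by omega
  induction ct using List.reverseRecOn with
  | nil => simp [pvColumn]
  | append_singleton xs x IH =>
    rw [pvColumn_append, IH]
    rw [show (xs ++ [x]).length = xs.length + 1 by simp]
    by_cases h : xs.length % K = c
    · rw [if_pos h]
      have hq : K * (xs.length / K) + c = xs.length := by
        conv_rhs => rw [← Nat.div_add_mod xs.length K]
        rw [h]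
      have hqL : xs.length / K ≤ xs.length := Nat.div_le_self _ _
      -- right side: truncate range (L+1) to range (q+1)
      rw [pv_fM_range_ext _ (xs.length / K + 1) (xs.length + 1) (by omega)
          (fun t h1 h2 => by
            apply List.getElem?_eq_none
            have h3 : K * (xs.length / K + 1) ≤ K * t := Nat.mul_le_mul_left K h1
            rw [Nat.mul_succ] at h3
            simp only [List.length_append, List.length_cons, List.length_nil]
            omega)]
      rw [List.range_succ, List.filterMap_append]
      congr 1
      · -- prefixes agree: indices below xs.length
        rw [pv_fM_range_ext (fun t => xs[K * t + c]?) (xs.length / K) xs.length hqL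
            (fun t h1 h2 => by
              apply List.getElem?_eq_none
              have : K * (xs.length / K) ≤ K * t := Nat.mul_le_mul_left K h1
              omega)]
        apply List.filterMap_congr
        intro t ht
        have ht' : t < xs.length / K := List.mem_range.mp ht
        have h4 : K * (t + 1) ≤ K * (xs.length / K) := Nat.mul_le_mul_left K ht'
        rw [Nat.mul_succ] at h4
        rw [List.getElem?_append_left (by omega)]
      · simp [show K * (xs.length / K) + c = xs.length from hq]
    · rw [if_neg h, List.append_nil]
      rw [List.range_succ, List.filterMap_append]
      have hne : ∀ t : Nat, K * t + c ≠ xs.length := by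
        intro t he
        apply h
        rw [← he, Nat.mul_add_mod, Nat.mod_eq_of_lt hc]
      have hlast : (xs ++ [x])[K * xs.length + c]? = (none : Option Int) := by
        apply List.getElem?_eq_none
        have : 1 * xs.length ≤ K * xs.length := Nat.mul_le_mul_right _ hK
        have := hne xs.length
        simp only [List.length_append, List.length_cons, List.length_nil]
        omega
      rw [show List.filterMap (fun t => (xs ++ [x])[K * t + c]?) [xs.length]
            = [] by simp [hlast]]
      rw [List.append_nil]
      apply List.filterMap_congr
      intro t ht
      have ht' : t < xs.length := List.mem_range.mp ht
      rcases lt_trichotomy (K * t + c) xs.length with hlt | heq | hgt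
      · rw [List.getElem?_append_left hlt]
      · exact absurd heq (hne t)
      · rw [List.getElem?_eq_none (l := xs ++ [x]) (by simp; omega),
            List.getElem?_eq_none (by omega)]

-- Python idx % key_length for 0 ≤ idx, 0 < key_length
theorem pv_mod_natCast (a b : Nat) (_hb : 0 < b) :
    PySem.Int.mod (a : Int) (b : Int) = ((a % b : Nat) : Int) := by
  simp [PySem.Int.mod, Int.fmod_eq_emod]

theorem pv_modify_map_range (F : Nat → List Int) (K j : Nat) (x : Int) :
    ((List.range K).map F).modify j (fun c => c ++ [x])
      = (List.range K).map (fun c => F c ++ (if c % K = j then [x] else [])) := by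
  apply List.ext_getElem
  · simp
  · intro c h1 h2
    simp only [List.getElem_modify, List.getElem_map, List.getElem_range]
    have hc : c < K := by simpa using h2
    have : c % K = c := Nat.mod_eq_of_lt hc
    by_cases hcj : j = c
    · simp [hcj, this]
    · simp [hcj, this, Ne.symm hcj]

theorem pv_B_canon (ct : List Int) (k : Int) (hk : 0 < k) :
    split_cipher_text_alt ct k = (List.range k.toNat).map (fun c => pvColumn ct k.toNat c) := by
  induction ct using List.reverseRecOn with
  | nil =>
    simp only [split_cipher_text_alt, if_pos hk, PySem.List.enumerate, List.foldl_nil]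
    apply List.ext_getElem
    · simp
    · intro c h1 h2
      simp [pvColumn]
  | append_singleton xs x IH =>
    have hKk : ((k.toNat : Int)) = k := Int.toNat_of_nonneg (by omega)
    have hK : 0 < k.toNat := by omega
    have hstep : split_cipher_text_alt (xs ++ [x]) k
        = (split_cipher_text_alt xs k).modify (xs.length % k.toNat) (fun c => c ++ [x]) := by
      simp only [split_cipher_text_alt, if_pos hk]
      rw [PySem.List.enumerate_append, List.foldl_append]
      simp only [PySem.List.enumerate, List.foldl_cons, List.foldl_nil, zero_add]
      congr 1
      have hmod := pv_mod_natCast xs.length k.toNat hK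
      rw [hKk] at hmod
      rw [hmod, Int.toNat_natCast]
    rw [hstep, IH, pv_modify_map_range _ _ _ _]
    apply List.map_congr_left
    intro c hc
    have hc' : c < k.toNat := List.mem_range.mp hc
    rw [pvColumn_append]
    congr 1
    by_cases h : xs.length % k.toNat = c
    · simp [h, Nat.mod_eq_of_lt hc']
    · simp [h, Nat.mod_eq_of_lt hc', Ne.symm h]

theorem pv_A_inner (ct : List Int) (k : Int) (hk : 0 < k) (c : Nat) (hc : c < k.toNat) :
    (PySem.List.pyRange 0 (ct.length : Int) k).foldl
      (fun nc j =>
        match PySem.List.pyGet? ct (j + (c : Int)) with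
        | some v => nc ++ [v]
        | none => nc) []
      = pvColumn ct k.toNat c := by
  have hKk : ((k.toNat : Int)) = k := Int.toNat_of_nonneg (by omega)
  have hK : 0 < k.toNat := by omega
  rw [pv_foldl_filterMap (PySem.List.pyRange 0 (ct.length : Int) k) ct ((c : Nat) : Int) [],
      List.nil_append]
  rw [PySem.List.pyRange_of_pos _ _ hk, List.filterMap_map]
  have harg : ∀ t : Nat, PySem.List.pyGet? ct ((0 : Int) + k * (t : Int) + (c : Int))
      = ct[k.toNat * t + c]? := by
    intro t
    rw [show (0 : Int) + k * (t : Int) + (c : Int) = ((k.toNat * t + c : Nat) : Int) by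
      have : ((k.toNat * t + c : Nat) : Int) = k * t + c := by push_cast [hKk]; ring
      omega]
    exact PySem.List.pyGet?_natCast _ _
  simp only [Function.comp_def, harg]
  rw [pvColumn_stride ct k.toNat c hc]
  -- now both sides are stride-K filterMaps over ranges of possibly different lengths
  set g : Nat → Option Int := fun t => ct[k.toNat * t + c]? with hg
  have hnone : ∀ t : Nat, ct.length ≤ k.toNat * t + c → g t = none := fun t h =>
    List.getElem?_eq_none h
  by_cases hL : 0 < ct.length
  · rw [if_pos (by exact_mod_cast hL)]
    have hm : ((((ct.length : Int) - 0 + k - 1) / k).toNat) = (ct.length + k.toNat - 1) / k.toNat := by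
      have e1 : ((ct.length : Int) - 0 + k - 1) = ((ct.length + k.toNat - 1 : Nat) : Int) := by
        omega
      have e2 : ((ct.length + k.toNat - 1 : Nat) : Int) / k
          = (((ct.length + k.toNat - 1) / k.toNat : Nat) : Int) := by
        conv_lhs => rw [← hKk]
        exact_mod_cast rfl
      rw [e1, e2]
      exact Int.toNat_natCast _
    rw [hm]
    set m := (ct.length + k.toNat - 1) / k.toNat with hmdef
    -- K * m ≥ ct.length
    have hqm : k.toNat * m + (ct.length + k.toNat - 1) % k.toNat = ct.length + k.toNat - 1 :=
      Nat.div_add_mod _ _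
    have hrm : (ct.length + k.toNat - 1) % k.toNat < k.toNat := Nat.mod_lt _ hK
    have hKm : ct.length ≤ k.toNat * m := by
      set p := k.toNat * m
      omega
    have hext : ∀ M : Nat, (∀ t, M ≤ t → ct.length ≤ k.toNat * t + c) →
        (List.range (M + ct.length)).filterMap g = (List.range M).filterMap g := by
      intro M hM
      exact pv_fM_range_ext g M (M + ct.length) (by omega)
        (fun t h1 _ => hnone t (hM t h1))
    have h1 : (List.range (m + ct.length)).filterMap g = (List.range m).filterMap g := by
      apply hext
      intro t ht
      have : k.toNat * m ≤ k.toNat * t := Nat.mul_le_mul_left _ ht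
      omega
    have h2 : (List.range (ct.length + ct.length)).filterMap g = (List.range ct.length).filterMap g := by
      apply hext
      intro t ht
      have : 1 * t ≤ k.toNat * t := Nat.mul_le_mul_right _ hK
      omega
    rcases Nat.le_total m ct.length with hmL | hmL
    · rw [← h2]
      rw [pv_fM_range_ext g m (ct.length + ct.length) (by omega)
          (fun t h1 _ => by
            apply hnone
            have : k.toNat * m ≤ k.toNat * t := Nat.mul_le_mul_left _ h1
            omega)]
    · rw [← h1]
      rw [pv_fM_range_ext g ct.length (m + ct.length) (by omega)
          (fun t h1 _ => by
            apply hnone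
            have : 1 * t ≤ k.toNat * t := Nat.mul_le_mul_right _ hK
            omega)]
  · have : ct.length = 0 := by omega
    rw [if_neg (by exact_mod_cast hL), this]
theorem pv_A_canon (ct : List Int) (k : Int) (hk : 0 < k) :
    split_cipher_text ct k = (List.range k.toNat).map (fun c => pvColumn ct k.toNat c) := by
  unfold split_cipher_text
  rw [pv_foldl_map_append, List.nil_append]
  rw [PySem.List.pyRange_one]
  rw [List.map_map]
  rw [show ((k : Int) - 0).toNat = k.toNat by omega]
  apply List.map_congr_left
  intro c hc
  have hc' : c < k.toNat := List.mem_range.mp hc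
  simp only [Function.comp_def, zero_add]
  exact pv_A_inner ct k hk c hc'

-- ===== VERDICT (by name: the statement is the Claim_ definition above) =====
theorem split_cipher_text_spec : Claim_equal_split_cipher_text := by
  intro ct k _
  unfold Spec_split_cipher_text
  by_cases hk : 0 < k
  · rw [pv_A_canon ct k hk, pv_B_canon ct k hk]
  · have h1 : split_cipher_text ct k = [] := by
      unfold split_cipher_text
      rw [PySem.List.pyRange_one_eq_nil (by omega)]
      rfl
    have h2 : split_cipher_text_alt ct k = [] := by
      unfold split_cipher_text_alt
      simp [hk]
    rw [h1, h2]
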